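-- pv_equiv track=rewrite | github.com/pypi-data/pypi-mirror-403 | packages/data-science-document-ai/data_science_document_ai-1.60.3.tar.gz/data_science_document_ai-1.60.3/src/postprocessing/postprocess_partner_invoice.py | select_unique_bank_account
-- ===== SOURCE A (Python) =====
-- from collections import defaultdict
--
-- def select_unique_bank_account(bank_account):
--     # Select the unique bank account if multiple are present
--     if isinstance(bank_account, list) and bank_account:
--         best = defaultdict(lambda: None)
--
--         for item in bank_account:
--             dv = item["documentValue"]
--             if best[dv] is None or item["page"] < best[dv]["page"]:
--                 best[dv] = item
--
--         unique = list(best.values())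
--         return unique
-- ===== SOURCE B (Python) =====
-- def select_unique_bank_account(bank_account):
--     # Two staged passes, no dict: collect documentValues in first-seen order,
--     # then for each value scan the whole list for its first page-minimal item.
--     if isinstance(bank_account, list) and bank_account:
--         seen = []
--         for item in bank_account:
--             dv = item["documentValue"]
--             if dv not in seen:
--                 seen.append(dv)
--         result = []
--         for dv in seen:
--             best = None
--             for it in bank_account:
--                 if it["documentValue"] == dv:
--                     if best is None or it["page"] < best["page"]:
--                         best = it
--             result.append(best)
--         return result
-- ===== Notes on version B (the rewrite author's own statement) =====
-- stated objective: alternative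
-- what changed: removes the dict entirely: instead of A's single-pass compare-and-overwrite defaultdict, B first collects the distinct documentValues in first-seen order into a list and then, for each value, rescans the whole input for its first page-minimal item (nested scans instead of a keyed running-best)
import Mathlib
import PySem

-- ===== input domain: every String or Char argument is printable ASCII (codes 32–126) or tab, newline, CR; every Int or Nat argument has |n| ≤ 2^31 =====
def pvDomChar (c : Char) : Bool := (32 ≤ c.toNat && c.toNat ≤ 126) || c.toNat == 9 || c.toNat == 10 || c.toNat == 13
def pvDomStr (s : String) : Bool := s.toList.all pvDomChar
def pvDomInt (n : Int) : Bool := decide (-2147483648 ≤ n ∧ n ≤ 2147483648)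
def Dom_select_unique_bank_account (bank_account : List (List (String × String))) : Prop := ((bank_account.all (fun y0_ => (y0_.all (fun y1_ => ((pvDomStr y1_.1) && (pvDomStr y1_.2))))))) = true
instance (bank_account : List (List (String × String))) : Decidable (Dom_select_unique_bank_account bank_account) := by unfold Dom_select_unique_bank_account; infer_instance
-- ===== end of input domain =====

-- B removes the dict: it lists the distinct documentValues in first-seen order, then rescans the
-- whole input per value for its first page-minimal item (objective: alternative decomposition;
-- equivalence of the RETURN value is proved on Pre_).

-- ===== PORT A =====
-- items are dicts str->str; item["k"] is ported as PySem.Dict.getD ⟨item⟩ "k" "" — the default ""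
-- is only reachable outside Pre_ (Python raises KeyError there).
def select_unique_bank_account (bank_account : List (List (String × String))) : Option (List (List (String × String))) :=
  if bank_account = [] then none
  else
    let best : PySem.Dict String (List (String × String)) :=
      bank_account.foldl
        (fun best item =>
          let dv := PySem.Dict.getD ⟨item⟩ "documentValue" ""
          match PySem.Dict.get? best dv with   -- defaultdict: best[dv] is None ⟺ dv not yet a key
          | none => PySem.Dict.insert best dv item
          | some cur =>
            if PySem.Dict.getD ⟨item⟩ "page" "" < PySem.Dict.getD ⟨cur⟩ "page" "" then
              PySem.Dict.insert best dv item
            else best)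
        PySem.Dict.empty
    some (PySem.Dict.values best)

-- ===== PORT B =====
-- 'best is None' tracked by Option; result.append(best) appends best's value (never None inside
-- Pre_, so .getD [] is unreachable there).
def select_unique_bank_account_alt (bank_account : List (List (String × String))) : Option (List (List (String × String))) :=
  if bank_account = [] then none
  else
    let seen : List String :=
      bank_account.foldl
        (fun seen item =>
          let dv := PySem.Dict.getD ⟨item⟩ "documentValue" ""
          if seen.contains dv then seen else seen ++ [dv]) []
    some (seen.map (fun dv =>
      (bank_account.foldl
        (fun best it =>
          if PySem.Dict.getD ⟨it⟩ "documentValue" "" == dv then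
            match best with
            | none => some it
            | some b =>
              if PySem.Dict.getD ⟨it⟩ "page" "" < PySem.Dict.getD ⟨b⟩ "page" "" then some it
              else some b
          else best) none).getD []))

-- ===== PRECONDITION & SPEC =====
-- Pre_ is exactly the set of inputs on which the Python A returns normally: A raises KeyError iff
-- some item lacks "documentValue", or some item whose documentValue occurs more than once lacks
-- "page" (the Python B raises on exactly the same inputs).
def Pre_select_unique_bank_account (bank_account : List (List (String × String))) : Prop :=
  ∀ item ∈ bank_account, "documentValue" ∈ item.map Prod.fst ∧
    (1 < bank_account.countP (fun j => PySem.Dict.getD ⟨j⟩ "documentValue" ""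
        == PySem.Dict.getD ⟨item⟩ "documentValue" "") → "page" ∈ item.map Prod.fst)
instance (bank_account : List (List (String × String))) : Decidable (Pre_select_unique_bank_account bank_account) := by unfold Pre_select_unique_bank_account; infer_instance

def pvWitness_select_unique_bank_account : (List (List (String × String))) :=
  [[("documentValue", "a"), ("page", "2")], [("documentValue", "a"), ("page", "1")]]

def Spec_select_unique_bank_account (bank_account : List (List (String × String))) (out : Option (List (List (String × String)))) : Prop := out = select_unique_bank_account_alt bank_account
instance (bank_account : List (List (String × String))) (out : Option (List (List (String × String)))) : Decidable (Spec_select_unique_bank_account bank_account out) := by unfold Spec_select_unique_bank_account; infer_instance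

-- ===== CLAIM (what is proved, stated in full; the proofs are below) =====
def Claim_equal_select_unique_bank_account : Prop := ∀ (bank_account : List (List (String × String))), Dom_select_unique_bank_account bank_account → Pre_select_unique_bank_account bank_account → Spec_select_unique_bank_account bank_account (select_unique_bank_account bank_account)

-- ===== LEMMAS AND PROOFS =====

-- abbreviations, definitionally equal to the lambdas inside the ports
def pvDv (x : List (String × String)) : String := PySem.Dict.getD ⟨x⟩ "documentValue" ""
def pvPage (x : List (String × String)) : String := PySem.Dict.getD ⟨x⟩ "page" ""

def pvStepA (best : PySem.Dict String (List (String × String))) (item : List (String × String)) :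
    PySem.Dict String (List (String × String)) :=
  match PySem.Dict.get? best (pvDv item) with
  | none => PySem.Dict.insert best (pvDv item) item
  | some cur => if pvPage item < pvPage cur then PySem.Dict.insert best (pvDv item) item else best

def pvKeysF (seen : List String) (item : List (String × String)) : List String :=
  if seen.contains (pvDv item) then seen else seen ++ [pvDv item]

def pvKeys (xs : List (List (String × String))) : List String := xs.foldl pvKeysF []

def pvStepMin (dv : String) (best : Option (List (String × String)))
    (it : List (String × String)) : Option (List (String × String)) :=
  if pvDv it == dv then
    match best with
    | none => some it
    | some b => if pvPage it < pvPage b then some it else some b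
  else best

def pvBest (xs : List (List (String × String))) (dv : String) : Option (List (String × String)) :=
  xs.foldl (pvStepMin dv) none

theorem pvBest_none (xs : List (List (String × String))) (dv : String)
    (h : ∀ it ∈ xs, pvDv it ≠ dv) : pvBest xs dv = none := by
  induction xs with
  | nil => rfl
  | cons x xs ih =>
    have hx : (pvDv x == dv) = false := by simpa using h x List.mem_cons_self
    show List.foldl (pvStepMin dv) (pvStepMin dv none x) xs = none
    rw [show pvStepMin dv none x = none by simp [pvStepMin, hx]]
    exact ih (fun it hit => h it (List.mem_cons_of_mem _ hit))

theorem pvBest_isSome (xs : List (List (String × String))) (dv : String)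
    (b : List (String × String)) :
    ∃ c, xs.foldl (pvStepMin dv) (some b) = some c := by
  induction xs generalizing b with
  | nil => exact ⟨b, rfl⟩
  | cons x xs ih =>
    show ∃ c, List.foldl (pvStepMin dv) (pvStepMin dv (some b) x) xs = some c
    have hs : ∃ b', pvStepMin dv (some b) x = some b' := by
      unfold pvStepMin
      by_cases h1 : (pvDv x == dv) = true
      · rw [if_pos h1]
        by_cases h2 : pvPage x < pvPage b
        · exact ⟨x, by simp [h2]⟩
        · exact ⟨b, by simp [h2]⟩
      · rw [if_neg h1]
        exact ⟨b, rfl⟩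
    obtain ⟨b', hb'⟩ := hs
    rw [hb']
    exact ih b'

theorem pv_mem_keys_aux (xs : List (List (String × String))) :
    ∀ (s : List String) (dv : String), dv ∈ xs.foldl pvKeysF s →
      dv ∈ s ∨ ∃ it ∈ xs, pvDv it = dv := by
  induction xs with
  | nil => intro s dv hs; exact Or.inl hs
  | cons x xs ih =>
    intro s dv hs
    rw [List.foldl_cons] at hs
    rcases ih _ dv hs with h' | h'
    · unfold pvKeysF at h'
      by_cases hc : s.contains (pvDv x) = true
      · rw [if_pos hc] at h'; exact Or.inl h'
      · rw [if_neg hc] at h'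
        rcases List.mem_append.mp h' with h'' | h''
        · exact Or.inl h''
        · exact Or.inr ⟨x, List.mem_cons_self, (List.mem_singleton.mp h'').symm⟩
    · obtain ⟨it, hit, hdv⟩ := h'
      exact Or.inr ⟨it, List.mem_cons_of_mem _ hit, hdv⟩

theorem pv_mem_keys (xs : List (List (String × String))) (dv : String)
    (h : dv ∈ pvKeys xs) : ∃ it ∈ xs, pvDv it = dv := by
  rcases pv_mem_keys_aux xs [] dv h with h' | h'
  · simp at h'
  · exact h'

theorem pv_keys_mono (xs : List (List (String × String))) (s : List String) (a : String)
    (h : a ∈ s) : a ∈ xs.foldl pvKeysF s := by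
  induction xs generalizing s with
  | nil => exact h
  | cons x xs ih =>
    rw [List.foldl_cons]
    apply ih
    unfold pvKeysF
    split
    · exact h
    · exact List.mem_append_left _ h

theorem pv_keys_complete (xs : List (List (String × String))) :
    ∀ it ∈ xs, pvDv it ∈ pvKeys xs := by
  suffices H : ∀ (s : List String), ∀ it ∈ xs, pvDv it ∈ xs.foldl pvKeysF s from
    fun it hit => H [] it hit
  induction xs with
  | nil => intro s it hit; simp at hit
  | cons x xs ih =>
    intro s it hit
    rw [List.foldl_cons]
    rcases List.mem_cons.mp hit with he | hm
    · subst he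
      apply pv_keys_mono
      unfold pvKeysF
      by_cases hc : s.contains (pvDv it) = true
      · rw [if_pos hc]; exact List.contains_iff_mem.mp hc
      · rw [if_neg hc]; simp
    · exact ih _ it hm

theorem pvKeys_append (xs : List (List (String × String))) (x : List (String × String)) :
    pvKeys (xs ++ [x]) = pvKeysF (pvKeys xs) x := by
  unfold pvKeys; rw [List.foldl_append]; rfl

theorem pvBest_append (xs : List (List (String × String))) (x : List (String × String))
    (dv : String) : pvBest (xs ++ [x]) dv = pvStepMin dv (pvBest xs dv) x := by
  unfold pvBest; rw [List.foldl_append]; rfl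

theorem pv_get?_canon (keys : List String) (v : String → List (String × String)) (dv : String) :
    PySem.Dict.get? (⟨keys.map (fun k => (k, v k))⟩ : PySem.Dict String (List (String × String))) dv
      = if dv ∈ keys then some (v dv) else none := by
  induction keys with
  | nil => simp [PySem.Dict.get?]
  | cons k ks ih =>
    simp only [PySem.Dict.get?, List.map_cons, List.find?_cons] at ih ⊢
    by_cases hk : k = dv
    · simp [hk]
    · have hb : ((k, v k).1 == dv) = false := by simpa using hk
      rw [hb]
      simp only [List.mem_cons]
      rw [ih]
      by_cases hm : dv ∈ ks <;> simp [hm, Ne.symm hk]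

theorem pv_contains_canon (keys : List String) (v : String → List (String × String)) (dv : String) :
    PySem.Dict.contains (⟨keys.map (fun k => (k, v k))⟩ :
      PySem.Dict String (List (String × String))) dv = keys.any (fun k => k == dv) := by
  simp [PySem.Dict.contains, List.any_map, Function.comp_def]

-- the main invariant: A's running dict is the first-seen key list paired with per-key min-folds
theorem pv_main (xs : List (List (String × String))) :
    xs.foldl pvStepA PySem.Dict.empty
      = ⟨(pvKeys xs).map (fun k => (k, (pvBest xs k).getD []))⟩ := by
  induction xs using List.reverseRecOn with
  | nil => rfl
  | append_singleton xs x ih =>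
    rw [List.foldl_append, List.foldl_cons, List.foldl_nil, ih]
    have hget := pv_get?_canon (pvKeys xs) (fun k => (pvBest xs k).getD []) (pvDv x)
    by_cases hmem : pvDv x ∈ pvKeys xs
    · -- key already present: get? finds the current best b
      obtain ⟨it0, hit0, hdv0⟩ := pv_mem_keys xs (pvDv x) hmem
      have hsome : ∃ b, pvBest xs (pvDv x) = some b := by
        obtain ⟨l1, l2, hl⟩ := List.append_of_mem hit0
        unfold pvBest
        rw [hl, List.foldl_append, List.foldl_cons]
        rw [show pvStepMin (pvDv x) (List.foldl (pvStepMin (pvDv x)) none l1) it0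
            = match List.foldl (pvStepMin (pvDv x)) none l1 with
              | none => some it0
              | some b => if pvPage it0 < pvPage b then some it0 else some b by
          simp [pvStepMin, hdv0]]
        cases List.foldl (pvStepMin (pvDv x)) none l1 with
        | none => exact pvBest_isSome l2 _ it0
        | some b =>
          dsimp only
          split
          · exact pvBest_isSome l2 _ it0
          · exact pvBest_isSome l2 _ b
      obtain ⟨b, hb⟩ := hsome
      rw [if_pos hmem] at hget
      have hcont : (pvKeys xs).contains (pvDv x) = true := List.contains_iff_mem.mpr hmem
      have hkeq : pvKeys (xs ++ [x]) = pvKeys xs := by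
        rw [pvKeys_append]; unfold pvKeysF; rw [if_pos hcont]
      have hany : ((pvKeys xs).any (fun k => k == pvDv x)) = true := by
        rw [List.any_eq_true]
        exact ⟨pvDv x, hmem, by simp⟩
      unfold pvStepA
      rw [hget, hb, Option.getD_some]
      dsimp only
      by_cases hlt : pvPage x < pvPage b
      · rw [if_pos hlt]
        unfold PySem.Dict.insert
        rw [pv_contains_canon, hany]
        simp only [if_true, List.map_map, hkeq]
        congr 1
        refine List.map_congr_left ?_
        intro k _
        by_cases hk : k = pvDv x
        · subst hk
          simp [pvBest_append, pvStepMin, hb, hlt]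
        · have hkb : (k == pvDv x) = false := by simpa using hk
          have hxb : (pvDv x == k) = false := by simpa using Ne.symm hk
          simp [pvBest_append, pvStepMin, hxb, hk]
      · rw [if_neg hlt]
        rw [hkeq]
        congr 1
        refine List.map_congr_left ?_
        intro k _
        by_cases hk : k = pvDv x
        · subst hk; simp [pvBest_append, pvStepMin, hb, hlt]
        · simp [pvBest_append, pvStepMin, (by simpa using Ne.symm hk : (pvDv x == k) = false)]
    · -- new key: appended at the end
      rw [if_neg hmem] at hget
      have hkeq : pvKeys (xs ++ [x]) = pvKeys xs ++ [pvDv x] := by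
        rw [pvKeys_append]; unfold pvKeysF; rw [if_neg (by simpa using hmem)]
      have hany : ((pvKeys xs).any (fun k => k == pvDv x)) = false := by
        rw [List.any_eq_false]
        intro k hk hbe
        exact hmem ((eq_of_beq hbe) ▸ hk)
      unfold pvStepA
      rw [hget]
      unfold PySem.Dict.insert
      rw [pv_contains_canon, hany]
      simp only [Bool.false_eq_true, if_false, hkeq, List.map_append, List.map_cons, List.map_nil]
      congr 1
      congr 1
      · refine List.map_congr_left ?_
        intro k hk
        have hne : pvDv x ≠ k := fun he => hmem (he ▸ hk)
        simp [pvBest_append, pvStepMin, (by simpa using hne : (pvDv x == k) = false)]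
      · have hnone : pvBest xs (pvDv x) = none :=
          pvBest_none xs _ (fun it hit he => hmem (he ▸ pv_keys_complete xs it hit))
        simp [pvBest_append, pvStepMin, hnone]

-- ===== VERDICT (by name: the statement is the Claim_ definition above) =====
theorem select_unique_bank_account_spec : Claim_equal_select_unique_bank_account := by
  intro bank_account _ _
  unfold Spec_select_unique_bank_account
  unfold select_unique_bank_account select_unique_bank_account_alt
  by_cases hnil : bank_account = []
  · simp [hnil]
  · rw [if_neg hnil, if_neg hnil]
    rw [show (bank_account.foldl (fun best item =>
          let dv := PySem.Dict.getD ⟨item⟩ "documentValue" ""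
          match PySem.Dict.get? best dv with
          | none => PySem.Dict.insert best dv item
          | some cur =>
            if PySem.Dict.getD ⟨item⟩ "page" "" < PySem.Dict.getD ⟨cur⟩ "page" "" then
              PySem.Dict.insert best dv item
            else best) PySem.Dict.empty)
        = bank_account.foldl pvStepA PySem.Dict.empty from rfl]
    rw [pv_main]
    simp only [PySem.Dict.values, List.map_map]
    rfl
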